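-- pv_equiv track=rewrite | github.com/P-Pavan-teja/price-snopy | fpe/main_fpc.py | _apply_format
-- ===== SOURCE A (Python) =====
-- def _apply_format(digits, original):
--     """Apply original format to digits"""
--     result = []
--     digit_index = 0
--     for char in original:
--         if char.isdigit():
--             if digit_index < len(digits):
--                 result.append(digits[digit_index])
--                 digit_index += 1
--             else:
--                 result.append('0')
--         else:
--             result.append(char)
--     return ''.join(result)
-- ===== SOURCE B (Python) =====
-- def _apply_format(digits, original):
--     """Apply original format to digits (two-phase: locate digit slots, then fill)."""
--     chars = list(original)
--     positions = [i for i, c in enumerate(chars) if c.isdigit()]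
--     count = len(positions)
--     taken = digits[:count]
--     padded = list(taken) + ['0'] * (count - len(taken))
--     for pos, d in zip(positions, padded):
--         chars[pos] = d
--     return ''.join(chars)
-- ===== Notes on version B (the rewrite author's own statement) =====
-- stated objective: alternative
-- what changed: Replaces A's single interleaved scan carrying a running digit cursor with a two-phase structure: first collect the indices of digit characters, build a padded/truncated digit list of exactly that length, then overwrite those positions in a mutable char list.
import Mathlib
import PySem

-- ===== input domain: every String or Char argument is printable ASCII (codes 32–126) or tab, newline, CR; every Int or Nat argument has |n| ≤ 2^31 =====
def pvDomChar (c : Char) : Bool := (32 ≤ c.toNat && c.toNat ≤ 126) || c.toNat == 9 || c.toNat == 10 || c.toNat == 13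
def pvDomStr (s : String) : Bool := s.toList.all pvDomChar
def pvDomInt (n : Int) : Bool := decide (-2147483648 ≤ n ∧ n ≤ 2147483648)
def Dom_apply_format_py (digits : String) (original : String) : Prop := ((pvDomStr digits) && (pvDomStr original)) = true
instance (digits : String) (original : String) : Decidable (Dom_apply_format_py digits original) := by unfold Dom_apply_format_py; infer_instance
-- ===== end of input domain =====

-- B replaces A's single stateful scan by a locate-digit-positions-then-fill two-phase structure (alternative decomposition, same cost).

-- ===== PORT A =====
-- literal port of A: one pass over `original`, state = (result list so far, digit cursor)
def apply_format_py (digits : String) (original : String) : String :=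
  let ds := digits.toList
  let st := original.toList.foldl
    (fun (st : List Char × Nat) c =>
      if c.isDigit then
        if st.2 < ds.length then (st.1 ++ [ds.getD st.2 '0'], st.2 + 1)  -- digits[digit_index], in range here
        else (st.1 ++ ['0'], st.2)
      else (st.1 ++ [c], st.2)) ([], 0)
  String.ofList st.1

-- ===== PORT B =====
-- literal port of Source B: positions of digit chars, padded digit list, overwrite those positions
def apply_format_py_alt (digits : String) (original : String) : String :=
  let chars := original.toList
  let positions := ((PySem.List.enumerate chars 0).filter (fun p => p.2.isDigit)).map Prod.fst
  let count := positions.length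
  let taken := digits.toList.take count                       -- digits[:count]
  let padded := taken ++ List.replicate (count - taken.length) '0'
  let filled := (positions.zip padded).foldl (fun cs pd => PySem.List.pySetD cs pd.1 pd.2) chars
  String.ofList filled

-- ===== PRECONDITION & SPEC =====
def Spec_apply_format_py (digits : String) (original : String) (out : String) : Prop := out = apply_format_py_alt digits original
instance (digits : String) (original : String) (out : String) : Decidable (Spec_apply_format_py digits original out) := by unfold Spec_apply_format_py; infer_instance

-- ===== CLAIM (what is proved, stated in full; the proofs are below) =====
def Claim_equal_apply_format_py : Prop := ∀ (digits : String) (original : String), Dom_apply_format_py digits original → Spec_apply_format_py digits original (apply_format_py digits original)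

-- ===== LEMMAS AND PROOFS =====

-- canonical recursive description both ports are reduced to
def interleave : List Char → List Char → List Char
  | [], _ => []
  | c :: cs, ds => if c.isDigit then ds.headD '0' :: interleave cs ds.tail else c :: interleave cs ds

def posns (cs : List Char) : List Int :=
  ((PySem.List.enumerate cs 0).filter (fun p => p.2.isDigit)).map Prod.fst

def pad (ds : List Char) (n : Nat) : List Char :=
  ds.take n ++ List.replicate (n - (ds.take n).length) '0'

def fillB (ps : List (Int × Char)) (cs : List Char) : List Char :=
  ps.foldl (fun cs pd => PySem.List.pySetD cs pd.1 pd.2) cs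

lemma foldA (ds : List Char) :
    ∀ (cs acc : List Char) (i : Nat),
      (cs.foldl (fun (st : List Char × Nat) c =>
        if c.isDigit then
          if st.2 < ds.length then (st.1 ++ [ds.getD st.2 '0'], st.2 + 1)
          else (st.1 ++ ['0'], st.2)
        else (st.1 ++ [c], st.2)) (acc, i)).1 = acc ++ interleave cs (ds.drop i) := by
  intro cs
  induction cs with
  | nil => intro acc i; simp [interleave]
  | cons c cs ih =>
    intro acc i
    by_cases hd : c.isDigit
    · by_cases hi : i < ds.length
      · simp only [List.foldl_cons, hd, if_true, hi, ih, interleave]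
        have h1 : (ds.drop i).headD '0' = ds.getD i '0' := by
          simp [List.head?_drop, List.getD_eq_getElem?_getD]
        have h2 : (ds.drop i).tail = ds.drop (i + 1) := by
          simp [List.tail_drop]
        simp [h2]
      · have hnil : ds.drop i = [] := List.drop_eq_nil_of_le (by omega)
        simp only [List.foldl_cons, hd, if_true, hi, if_false, ih, interleave, hnil]
        simp
    · simp only [List.foldl_cons, hd, ih, interleave]
      simp

lemma enumerate_shift {α : Type} (xs : List α) :
    ∀ s : Int, PySem.List.enumerate xs (s + 1) = (PySem.List.enumerate xs s).map (fun p => (p.1 + 1, p.2)) := by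
  induction xs with
  | nil => intro s; simp [PySem.List.enumerate_nil]
  | cons x xs ih =>
    intro s
    rw [PySem.List.enumerate_cons, PySem.List.enumerate_cons, List.map_cons, ← ih (s + 1)]

lemma posns_cons (c : Char) (cs : List Char) :
    posns (c :: cs) = (if c.isDigit then [(0 : Int)] else []) ++ (posns cs).map (· + 1) := by
  unfold posns
  rw [PySem.List.enumerate_cons, enumerate_shift]
  by_cases hd : c.isDigit <;>
    simp [hd, List.filter_map, List.map_map, Function.comp_def]

lemma posns_nonneg (cs : List Char) : ∀ p ∈ posns cs, 0 ≤ p := by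
  intro p hp
  unfold posns at hp
  obtain ⟨q, hq, rfl⟩ := List.mem_map.mp hp
  have hm := (List.mem_filter.mp hq).1
  obtain ⟨k, hk, rfl⟩ := (PySem.List.mem_enumerate_iff cs 0 q).mp hm
  simp

lemma fill_shift (l : List (Int × Char)) (h : ∀ p ∈ l, 0 ≤ p.1) :
    ∀ (x : Char) (xs : List Char),
      fillB (l.map (fun p => (p.1 + 1, p.2))) (x :: xs) = x :: fillB l xs := by
  induction l with
  | nil => intro x xs; simp [fillB]
  | cons p l ih =>
    intro x xs
    have hp : 0 ≤ p.1 := h p (by simp)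
    have hstep : PySem.List.pySetD (x :: xs) (p.1 + 1) p.2 = x :: PySem.List.pySetD xs p.1 p.2 := by
      rw [PySem.List.pySetD_of_nonneg _ _ (by omega), PySem.List.pySetD_of_nonneg _ _ hp]
      have ht : (p.1 + 1).toNat = p.1.toNat + 1 := by omega
      rw [ht]
      rfl
    have h' : ∀ q ∈ l, 0 ≤ q.1 := fun q hq => h q (by simp [hq])
    calc fillB ((p :: l).map (fun p => (p.1 + 1, p.2))) (x :: xs)
        = fillB (l.map (fun p => (p.1 + 1, p.2))) (PySem.List.pySetD (x :: xs) (p.1 + 1) p.2) := rfl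
      _ = fillB (l.map (fun p => (p.1 + 1, p.2))) (x :: PySem.List.pySetD xs p.1 p.2) := by rw [hstep]
      _ = x :: fillB l (PySem.List.pySetD xs p.1 p.2) := ih h' _ _
      _ = x :: fillB (p :: l) xs := rfl

lemma pad_succ (ds : List Char) (n : Nat) :
    pad ds (n + 1) = ds.headD '0' :: pad ds.tail n := by
  cases ds with
  | nil => simp [pad, List.replicate_succ]
  | cons d ds => simp [pad]

lemma nonneg_zip (cs : List Char) (ps : List Char) :
    ∀ p ∈ (posns cs).zip ps, 0 ≤ p.1 := by
  intro p hp
  have h1 : p.1 ∈ posns cs := by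
    have := List.of_mem_zip hp
    exact this.1
  exact posns_nonneg cs p.1 h1

lemma zip_map_shift (P : List Int) (ps : List Char) :
    (P.map (· + 1)).zip ps = (P.zip ps).map (fun p => (p.1 + 1, p.2)) := by
  rw [List.zip_map_left]
  rfl

lemma B_main : ∀ (cs ds : List Char),
    fillB ((posns cs).zip (pad ds (posns cs).length)) cs = interleave cs ds := by
  intro cs
  induction cs with
  | nil => intro ds; simp [posns, fillB, interleave, PySem.List.enumerate_nil]
  | cons c cs ih =>
    intro ds
    by_cases hd : c.isDigit
    · rw [posns_cons]
      rw [if_pos hd]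
      simp only [List.singleton_append, List.length_cons, List.length_map]
      rw [pad_succ, List.zip_cons_cons]
      have h0 : PySem.List.pySetD (c :: cs) (0 : Int) (ds.headD '0') = ds.headD '0' :: cs := by
        rw [PySem.List.pySetD_of_nonneg _ _ (by omega)]
        rfl
      calc fillB (((0 : Int), ds.headD '0') ::
              ((posns cs).map (· + 1)).zip (pad ds.tail (posns cs).length)) (c :: cs)
          = fillB (((posns cs).map (· + 1)).zip (pad ds.tail (posns cs).length))
              (PySem.List.pySetD (c :: cs) 0 (ds.headD '0')) := rfl
        _ = fillB (((posns cs).zip (pad ds.tail (posns cs).length)).map (fun p => (p.1 + 1, p.2)))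
              (ds.headD '0' :: cs) := by rw [h0, zip_map_shift]
        _ = ds.headD '0' :: fillB ((posns cs).zip (pad ds.tail (posns cs).length)) cs :=
              fill_shift _ (nonneg_zip cs _) _ _
        _ = ds.headD '0' :: interleave cs ds.tail := by rw [ih ds.tail]
        _ = interleave (c :: cs) ds := by rw [interleave]; rw [if_pos hd]
    · rw [posns_cons]
      rw [if_neg hd]
      simp only [List.nil_append, List.length_map]
      calc fillB (((posns cs).map (· + 1)).zip (pad ds (posns cs).length)) (c :: cs)
          = fillB (((posns cs).zip (pad ds (posns cs).length)).map (fun p => (p.1 + 1, p.2)))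
              (c :: cs) := by rw [zip_map_shift]
        _ = c :: fillB ((posns cs).zip (pad ds (posns cs).length)) cs :=
              fill_shift _ (nonneg_zip cs _) _ _
        _ = c :: interleave cs ds := by rw [ih ds]
        _ = interleave (c :: cs) ds := by rw [interleave]; rw [if_neg hd]

-- ===== VERDICT (by name: the statement is the Claim_ definition above) =====
theorem apply_format_py_spec : Claim_equal_apply_format_py := by
  intro digits original _
  unfold Spec_apply_format_py apply_format_py apply_format_py_alt
  simp only []
  rw [foldA digits.toList original.toList [] 0, List.drop_zero, List.nil_append]
  exact congrArg String.ofList (B_main original.toList digits.toList).symm
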